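-- pv_equiv track=rewrite | github.com/mkenjayev99/Hackerrank_solutions | contest.isystem.uz problems/29.py | Solve
-- ===== SOURCE A (Python) =====
-- def Solve(n, m):
--
--     X_axis = []
--     X_axis = [-2, -1, 1, 2]
--     Y_axis = []
--     Y_axis = [1, 2, 2, 1]
--
--     ret = 0
--
--     for i in range(m):
--         for j in range(n):
--             for k in range(4):
--
--                 x = i + X_axis[k]
--                 y = j + Y_axis[k]
--
--                 if (x >= 0 and x < m and
--                         y >= 0 and y < n):
--                     ret += 1
--
--     Total = m * n
--     Total = Total * (Total - 1) // 2
--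
--     return 2 * (Total - ret)
-- ===== SOURCE B (Python) =====
-- def Solve(n, m):
--     # closed-form count of (two of the eight) knight-move adjacencies, O(1)
--     ret = 2 * (max(0, m - 2) * max(0, n - 1) + max(0, m - 1) * max(0, n - 2))
--     total = m * n * (m * n - 1) // 2
--     return 2 * (total - ret)
-- ===== Notes on version B (the rewrite author's own statement) =====
-- stated objective: faster
-- what changed: Replaces the O(m*n) triple loop over all cells and the four knight offsets by a closed-form product formula for the number of attacking placements, computing the same result in O(1).
import Mathlib
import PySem

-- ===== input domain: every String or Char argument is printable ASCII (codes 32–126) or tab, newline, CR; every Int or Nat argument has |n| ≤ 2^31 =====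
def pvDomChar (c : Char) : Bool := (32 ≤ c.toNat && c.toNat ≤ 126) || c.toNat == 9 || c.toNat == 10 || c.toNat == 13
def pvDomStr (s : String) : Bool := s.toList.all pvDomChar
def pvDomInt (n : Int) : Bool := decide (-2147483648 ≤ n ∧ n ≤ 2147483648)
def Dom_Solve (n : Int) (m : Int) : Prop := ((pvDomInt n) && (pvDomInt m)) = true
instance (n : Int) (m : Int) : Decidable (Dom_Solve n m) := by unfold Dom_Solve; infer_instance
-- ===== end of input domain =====

-- B replaces A's triple loop by a closed-form product formula for the same count.

-- ===== PORT A =====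
def Solve (n : Int) (m : Int) : Int :=
  let X_axis : List Int := [-2, -1, 1, 2]
  let Y_axis : List Int := [1, 2, 2, 1]
  let ret : Int :=
    (PySem.List.pyRange 0 m 1).foldl (fun ret i =>
      (PySem.List.pyRange 0 n 1).foldl (fun ret j =>
        (PySem.List.pyRange 0 4 1).foldl (fun ret k =>
          -- k ranges over [0,4), always a valid index of the two 4-element lists,
          -- so the pyGetD default 0 is unreachable (X_axis[k] / Y_axis[k] never raise)
          if 0 ≤ i + PySem.List.pyGetD X_axis k 0 ∧ i + PySem.List.pyGetD X_axis k 0 < m ∧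
             0 ≤ j + PySem.List.pyGetD Y_axis k 0 ∧ j + PySem.List.pyGetD Y_axis k 0 < n
          then ret + 1 else ret) ret) ret) 0
  let total := m * n
  let total := PySem.Int.floordiv (total * (total - 1)) 2
  2 * (total - ret)

-- ===== PORT B =====
def Solve_alt (n : Int) (m : Int) : Int :=
  let ret := 2 * (max 0 (m - 2) * max 0 (n - 1) + max 0 (m - 1) * max 0 (n - 2))
  let total := PySem.Int.floordiv (m * n * (m * n - 1)) 2
  2 * (total - ret)

-- ===== PRECONDITION & SPEC =====
def Spec_Solve (n : Int) (m : Int) (out : Int) : Prop := out = Solve_alt n m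
instance (n : Int) (m : Int) (out : Int) : Decidable (Spec_Solve n m out) := by unfold Spec_Solve; infer_instance

-- ===== CLAIM (what is proved, stated in full; the proofs are below) =====
def Claim_equal_Solve : Prop := ∀ (n : Int) (m : Int), Dom_Solve n m → Spec_Solve n m (Solve n m)

-- ===== LEMMAS AND PROOFS =====

-- a loop 'acc = acc + g x' accumulated over a list is init + the sum of g
theorem pv_foldl_sum (l : List Int) (g : Int → Int) (f : Int → Int → Int)
    (h : ∀ acc x, x ∈ l → f acc x = acc + g x) (init : Int) :
    l.foldl f init = init + (l.map g).sum := by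
  induction l generalizing init with
  | nil => simp
  | cons a t ih =>
    rw [List.foldl_cons, h init a (List.mem_cons_self),
        ih (fun acc x hx => h acc x (List.mem_cons_of_mem _ hx))]
    simp [List.map_cons, List.sum_cons]; ring

-- Σ_{j ∈ [0,n)} [j < b] = max 0 (min n b)
theorem pv_sum_lt (n b : Int) :
    ((PySem.List.pyRange 0 n 1).map (fun j => if j < b then (1:Int) else 0)).sum
      = max 0 (min n b) := by
  by_cases h : n ≤ 0
  · rw [PySem.List.pyRange_one_eq_nil (by omega)]; simp; omega
  · have h' : (0:Int) < n := by omega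
    lift n to ℕ using h'.le with K
    induction K with
    | zero => simp at h'
    | succ K ih =>
      rw [show ((K+1 : ℕ) : Int) = (K : Int) + 1 by push_cast; ring,
          PySem.List.pyRange_one_succ_right (by positivity)]
      simp only [List.map_append, List.sum_append, List.map_cons, List.map_nil,
        List.sum_cons, List.sum_nil]
      rcases Nat.eq_zero_or_pos K with hK | hK
      · subst hK; simp; split_ifs <;> omega
      · rw [ih (by omega) (by exact_mod_cast hK)]
        split_ifs <;> omega

-- Σ_{j ∈ [0,n)} [b ≤ j] = max 0 (n - max 0 b)
theorem pv_sum_ge (n b : Int) :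
    ((PySem.List.pyRange 0 n 1).map (fun j => if b ≤ j then (1:Int) else 0)).sum
      = max 0 (n - max 0 b) := by
  by_cases h : n ≤ 0
  · rw [PySem.List.pyRange_one_eq_nil (by omega)]; simp; omega
  · have h' : (0:Int) < n := by omega
    lift n to ℕ using h'.le with K
    induction K with
    | zero => simp at h'
    | succ K ih =>
      rw [show ((K+1 : ℕ) : Int) = (K : Int) + 1 by push_cast; ring,
          PySem.List.pyRange_one_succ_right (by positivity)]
      simp only [List.map_append, List.sum_append, List.map_cons, List.map_nil,
        List.sum_cons, List.sum_nil]
      rcases Nat.eq_zero_or_pos K with hK | hK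
      · subst hK; simp; split_ifs <;> omega
      · rw [ih (by omega) (by exact_mod_cast hK)]
        split_ifs <;> omega

-- one (dx,dy) offset summed over a row of the board
theorem pv_term_sum (m n i d e : Int) (he : 0 ≤ e) :
    ((PySem.List.pyRange 0 n 1).map
        (fun j => if 0 ≤ i + d ∧ i + d < m ∧ 0 ≤ j + e ∧ j + e < n then (1:Int) else 0)).sum
      = (if 0 ≤ i + d ∧ i + d < m then (1:Int) else 0) * max 0 (n - e) := by
  by_cases hP : 0 ≤ i + d ∧ i + d < m
  · rw [List.map_congr_left (g := fun j => if j < n - e then (1:Int) else 0)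
      (fun j hj => by
        rw [PySem.List.mem_pyRange_one] at hj
        simp only [hP.1, hP.2, true_and]
        split_ifs <;> omega),
      pv_sum_lt]
    simp only [hP, and_self, if_true, one_mul]
    omega
  · rw [List.map_congr_left (g := fun _ => (0:Int))
      (fun j hj => by
        split_ifs with hc
        · exact absurd ⟨hc.1, hc.2.1⟩ hP
        · rfl)]
    simp [hP]

-- Σ_{i ∈ [0,m)} [0 ≤ i+d ∧ i+d < m] = max 0 (m - |d|)
theorem pv_shift_sum (m d : Int) :
    ((PySem.List.pyRange 0 m 1).map
        (fun i => if 0 ≤ i + d ∧ i + d < m then (1:Int) else 0)).sum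
      = max 0 (m - |d|) := by
  rcases le_total d 0 with hd | hd
  · rw [List.map_congr_left (g := fun i => if (-d) ≤ i then (1:Int) else 0)
      (fun i hi => by
        rw [PySem.List.mem_pyRange_one] at hi
        dsimp only
        split_ifs <;> omega),
      pv_sum_ge]
    have : |d| = -d := abs_of_nonpos hd
    omega
  · rw [List.map_congr_left (g := fun i => if i < m - d then (1:Int) else 0)
      (fun i hi => by
        rw [PySem.List.mem_pyRange_one] at hi
        dsimp only
        split_ifs <;> omega),
      pv_sum_lt]
    have : |d| = d := abs_of_nonneg hd
    omega

-- the inner k-loop of A, unrolled over range(4)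
theorem pv_kfold (m n i j ret : Int) :
    (PySem.List.pyRange 0 4 1).foldl (fun ret k =>
        if 0 ≤ i + PySem.List.pyGetD [-2, -1, 1, 2] k 0 ∧ i + PySem.List.pyGetD [-2, -1, 1, 2] k 0 < m ∧
           0 ≤ j + PySem.List.pyGetD [1, 2, 2, 1] k 0 ∧ j + PySem.List.pyGetD [1, 2, 2, 1] k 0 < n
        then ret + 1 else ret) ret
    = ret
      + ((if 0 ≤ i + (-2) ∧ i + (-2) < m ∧ 0 ≤ j + 1 ∧ j + 1 < n then (1:Int) else 0)
      + ((if 0 ≤ i + (-1) ∧ i + (-1) < m ∧ 0 ≤ j + 2 ∧ j + 2 < n then (1:Int) else 0)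
      + ((if 0 ≤ i + 1 ∧ i + 1 < m ∧ 0 ≤ j + 2 ∧ j + 2 < n then (1:Int) else 0)
      +  (if 0 ≤ i + 2 ∧ i + 2 < m ∧ 0 ≤ j + 1 ∧ j + 1 < n then (1:Int) else 0)))) := by
  have h4 : PySem.List.pyRange 0 4 1 = [0, 1, 2, 3] := by decide
  have e0 : PySem.List.pyGetD [(-2:Int), -1, 1, 2] 0 0 = -2 := by decide
  have e1 : PySem.List.pyGetD [(-2:Int), -1, 1, 2] 1 0 = -1 := by decide
  have e2 : PySem.List.pyGetD [(-2:Int), -1, 1, 2] 2 0 = 1 := by decide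
  have e3 : PySem.List.pyGetD [(-2:Int), -1, 1, 2] 3 0 = 2 := by decide
  have f0 : PySem.List.pyGetD [(1:Int), 2, 2, 1] 0 0 = 1 := by decide
  have f1 : PySem.List.pyGetD [(1:Int), 2, 2, 1] 1 0 = 2 := by decide
  have f2 : PySem.List.pyGetD [(1:Int), 2, 2, 1] 2 0 = 2 := by decide
  have f3 : PySem.List.pyGetD [(1:Int), 2, 2, 1] 3 0 = 1 := by decide
  rw [h4]
  simp only [List.foldl_cons, List.foldl_nil, e0, e1, e2, e3, f0, f1, f2, f3]
  split_ifs <;> omega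

-- A's accumulated count equals the closed form B uses
theorem pv_ret_closed (m n : Int) :
    (PySem.List.pyRange 0 m 1).foldl (fun ret i =>
      (PySem.List.pyRange 0 n 1).foldl (fun ret j =>
        (PySem.List.pyRange 0 4 1).foldl (fun ret k =>
          if 0 ≤ i + PySem.List.pyGetD [-2, -1, 1, 2] k 0 ∧ i + PySem.List.pyGetD [-2, -1, 1, 2] k 0 < m ∧
             0 ≤ j + PySem.List.pyGetD [1, 2, 2, 1] k 0 ∧ j + PySem.List.pyGetD [1, 2, 2, 1] k 0 < n
          then ret + 1 else ret) ret) ret) 0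
    = 2 * (max 0 (m - 2) * max 0 (n - 1) + max 0 (m - 1) * max 0 (n - 2)) := by
  have hrow : ∀ (i acc : Int),
      (PySem.List.pyRange 0 n 1).foldl (fun ret j =>
        (PySem.List.pyRange 0 4 1).foldl (fun ret k =>
          if 0 ≤ i + PySem.List.pyGetD [-2, -1, 1, 2] k 0 ∧ i + PySem.List.pyGetD [-2, -1, 1, 2] k 0 < m ∧
             0 ≤ j + PySem.List.pyGetD [1, 2, 2, 1] k 0 ∧ j + PySem.List.pyGetD [1, 2, 2, 1] k 0 < n
          then ret + 1 else ret) ret) acc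
      = acc + ((if 0 ≤ i + (-2) ∧ i + (-2) < m then (1:Int) else 0) * max 0 (n - 1)
             + ((if 0 ≤ i + (-1) ∧ i + (-1) < m then (1:Int) else 0) * max 0 (n - 2)
             + ((if 0 ≤ i + 1 ∧ i + 1 < m then (1:Int) else 0) * max 0 (n - 2)
             +  (if 0 ≤ i + 2 ∧ i + 2 < m then (1:Int) else 0) * max 0 (n - 1)))) := by
    intro i acc
    rw [pv_foldl_sum _ (fun j =>
          ((if 0 ≤ i + (-2) ∧ i + (-2) < m ∧ 0 ≤ j + 1 ∧ j + 1 < n then (1:Int) else 0)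
        + ((if 0 ≤ i + (-1) ∧ i + (-1) < m ∧ 0 ≤ j + 2 ∧ j + 2 < n then (1:Int) else 0)
        + ((if 0 ≤ i + 1 ∧ i + 1 < m ∧ 0 ≤ j + 2 ∧ j + 2 < n then (1:Int) else 0)
        +  (if 0 ≤ i + 2 ∧ i + 2 < m ∧ 0 ≤ j + 1 ∧ j + 1 < n then (1:Int) else 0)))))
        _ (fun acc j _ => pv_kfold m n i j acc) acc,
       PySem.List.sum_map_add_int, PySem.List.sum_map_add_int, PySem.List.sum_map_add_int,
       pv_term_sum m n i (-2) 1 (by omega), pv_term_sum m n i (-1) 2 (by omega),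
       pv_term_sum m n i 1 2 (by omega), pv_term_sum m n i 2 1 (by omega)]
  rw [pv_foldl_sum _ (fun i =>
        ((if 0 ≤ i + (-2) ∧ i + (-2) < m then (1:Int) else 0) * max 0 (n - 1)
      + ((if 0 ≤ i + (-1) ∧ i + (-1) < m then (1:Int) else 0) * max 0 (n - 2)
      + ((if 0 ≤ i + 1 ∧ i + 1 < m then (1:Int) else 0) * max 0 (n - 2)
      +  (if 0 ≤ i + 2 ∧ i + 2 < m then (1:Int) else 0) * max 0 (n - 1)))))
      _ (fun acc i _ => hrow i acc) 0,
     PySem.List.sum_map_add_int, PySem.List.sum_map_add_int, PySem.List.sum_map_add_int,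
     List.sum_map_mul_right, List.sum_map_mul_right,
     List.sum_map_mul_right, List.sum_map_mul_right,
     pv_shift_sum m (-2), pv_shift_sum m (-1), pv_shift_sum m 1, pv_shift_sum m 2,
     show |(-2:Int)| = 2 from by decide, show |(-1:Int)| = 1 from by decide,
     show |(1:Int)| = 1 from by decide, show |(2:Int)| = 2 from by decide]
  ring

-- ===== VERDICT (by name: the statement is the Claim_ definition above) =====
theorem Solve_spec : Claim_equal_Solve := by
  intro n m _
  show Solve n m = Solve_alt n m
  simp only [Solve, Solve_alt]
  rw [pv_ret_closed m n]
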